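-- pv_equiv track=rewrite | github.com/charlesgiry/advent_of_code | y2023/days/day14.py | move_stone_y_axis
-- ===== SOURCE A (Python) =====
-- def move_stone_y_axis(array: list[str], up: bool):
--     """
--     Move all the stones either up or down
--     """
--     len_y = len(array)
--     len_x = len(array[0])
--
--     steps = [[] for _ in range(len_x)]
--     for x in range(len_x):
--         step = {'O': 0, '.': 0, '#': 0}
--         for y in range(len_y):
--             if array[y][x] != '#':
--                 step[array[y][x]] += 1
--             else:
--                 step['#'] = 1
--                 steps[x].append(step)
--                 step = {'O': 0, '.': 0, '#': 0}
--
--         if step['O'] != 0 or step['.'] != 0: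
--             steps[x].append(step)
--
--     new_array = ['' for _ in range(len_y)]
--     for x in range(len_x):
--         # get the characters to write
--         write = ''
--         for step in steps[x]:
--             if up:
--                 write += 'O' * step['O'] + '.' * step['.'] + '#' * step['#']
--             else:
--                 write += '.' * step['.'] + 'O' * step['O'] + '#' * step['#']
--         for y in range(len_y):
--             new_array[y] += write[y]
--
--     return new_array
-- ===== SOURCE B (Python) =====
-- def move_stone_y_axis(array: list[str], up: bool):
--     """
--     Move all the stones either up or down
--     """
--     len_y = len(array)
--     len_x = len(array[0])
--     # Encode each cell of a column as an integer 3*segment + rank, where segment is the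
--     # number of '#' above it and rank orders the characters by where gravity sends them
--     # ('O' before '.' when rolling up, '.' before 'O' when rolling down, '#' last in its
--     # segment).  Sorting the codes rolls the stones; decoding code % 3 restores the chars.
--     rank = {'O': 0, '.': 1, '#': 2} if up else {'.': 0, 'O': 1, '#': 2}
--     inv = {v: k for k, v in rank.items()}
--     newcols = []
--     for x in range(len_x):
--         codes = []
--         seg = 0
--         for row in array:
--             c = row[x]
--             codes.append(3 * seg + rank[c])
--             if c == '#':
--                 seg += 1
--         newcols.append([inv[code % 3] for code in sorted(codes)])
--     return [''.join(col[y] for col in newcols) for y in range(len_y)]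
-- ===== Notes on version B (the rewrite author's own statement) =====
-- stated objective: alternative
-- what changed: Replaces A's per-segment count-dict bookkeeping and string repacking by an encode-sort-decode scheme: each cell becomes the integer 3*(number of '#' above it)+rank(char), sorting the codes of a column performs the roll, and code%3 decodes back to characters.
import Mathlib
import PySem

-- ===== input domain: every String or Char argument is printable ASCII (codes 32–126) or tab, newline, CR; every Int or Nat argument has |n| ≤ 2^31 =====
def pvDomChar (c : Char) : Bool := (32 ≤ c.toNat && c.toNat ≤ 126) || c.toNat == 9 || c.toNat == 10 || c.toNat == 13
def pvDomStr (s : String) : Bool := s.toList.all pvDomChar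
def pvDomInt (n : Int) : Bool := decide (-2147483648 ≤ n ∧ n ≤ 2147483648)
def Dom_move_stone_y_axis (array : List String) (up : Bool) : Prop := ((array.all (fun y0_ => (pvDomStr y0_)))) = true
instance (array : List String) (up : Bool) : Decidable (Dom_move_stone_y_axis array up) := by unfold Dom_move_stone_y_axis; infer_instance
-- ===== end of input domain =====

-- B replaces A's per-segment count-dict bookkeeping and column-major string assembly by an
-- encode-sort-decode scheme: each cell becomes the integer 3*(#walls above)+rank(char),
-- sorting a column's codes performs the roll, code % 3 decodes back (objective: alternative).

-- ===== PORT A =====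
-- the Python dict {'O': o, '.': d, '#': h} is ported as the triple (o, d, h)
-- (counts are provably nonnegative, kept as Nat); a character other than 'O'/'.'/'#'
-- would raise KeyError in Python (excluded by Pre_), here it is counted like '.'.
def pvStepF (st : List (Nat × Nat × Nat) × (Nat × Nat × Nat)) (c : Char) :
    List (Nat × Nat × Nat) × (Nat × Nat × Nat) :=
  if c ≠ '#' then
    if c = 'O' then (st.1, (st.2.1 + 1, st.2.2.1, st.2.2.2))
    else (st.1, (st.2.1, st.2.2.1 + 1, st.2.2.2))
  else (st.1 ++ [(st.2.1, st.2.2.1, 1)], (0, 0, 0))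

-- the trailing "if step['O'] != 0 or step['.'] != 0: steps[x].append(step)"
def pvFinalize (p : List (Nat × Nat × Nat) × (Nat × Nat × Nat)) : List (Nat × Nat × Nat) :=
  if p.2.1 ≠ 0 ∨ p.2.2.1 ≠ 0 then p.1 ++ [p.2] else p.1

-- the inner y-loop for one column x (array[y][x] is in range under Pre_; getD default is never used there)
def pvStepsFor (array : List String) (x : Nat) : List (Nat × Nat × Nat) :=
  pvFinalize (array.foldl (fun st row => pvStepF st (row.toList.getD x '.')) ([], (0, 0, 0)))

-- "'O' * step['O'] + '.' * step['.'] + '#' * step['#']" (resp. the down order)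
def pvRender (up : Bool) (s : Nat × Nat × Nat) : List Char :=
  if up then List.replicate s.1 'O' ++ List.replicate s.2.1 '.' ++ List.replicate s.2.2 '#'
  else List.replicate s.2.1 '.' ++ List.replicate s.1 'O' ++ List.replicate s.2.2 '#'

-- "write = ''; for step in steps[x]: write += …"
def pvWriteFor (up : Bool) (steps : List (Nat × Nat × Nat)) : List Char :=
  steps.foldl (fun w s => w ++ pvRender up s) []

def move_stone_y_axis (array : List String) (up : Bool) : List String :=
  let len_y := array.length
  let len_x := (array.headD "").toList.length
  let steps := (List.range len_x).map (fun x => pvStepsFor array x)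
  -- "for y in range(len_y): new_array[y] += write[y]" (write has length len_y under Pre_)
  let fin := (List.range len_x).foldl
    (fun na x => List.zipWith (fun s c => s ++ [c]) na (pvWriteFor up (steps.getD x []))) (List.replicate len_y [])
  fin.map String.mk

-- ===== PORT B =====
-- "rank = {'O': 0, '.': 1, '#': 2} if up else {'.': 0, 'O': 1, '#': 2}"
def pvRankD (up : Bool) : PySem.Dict Char Int :=
  if up then
    PySem.Dict.insert (PySem.Dict.insert (PySem.Dict.insert PySem.Dict.empty 'O' 0) '.' 1) '#' 2
  else
    PySem.Dict.insert (PySem.Dict.insert (PySem.Dict.insert PySem.Dict.empty '.' 0) 'O' 1) '#' 2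

-- "inv = {v: k for k, v in rank.items()}"
def pvInvD (up : Bool) : PySem.Dict Int Char :=
  (PySem.Dict.items (pvRankD up)).foldl (fun d kv => PySem.Dict.insert d kv.2 kv.1) PySem.Dict.empty

-- the inner loop building codes for column x; "rank[c]" raises KeyError on other chars
-- (excluded by Pre_), the getD default is never used there
def pvCodesB (array : List String) (up : Bool) (x : Nat) : List Int :=
  (array.foldl (fun st row =>
      (st.1 ++ [3 * st.2 + PySem.Dict.getD (pvRankD up) (row.toList.getD x '.') 0],
       if row.toList.getD x '.' = '#' then st.2 + 1 else st.2))
    (([] : List Int), (0 : Int))).1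

-- "[inv[code % 3] for code in sorted(codes)]"
def pvNewColB (array : List String) (up : Bool) (x : Nat) : List Char :=
  (PySem.List.sorted (pvCodesB array up x) (fun v => v) false).map
    (fun code => PySem.Dict.getD (pvInvD up) (PySem.Int.mod code 3) ' ')

def move_stone_y_axis_alt (array : List String) (up : Bool) : List String :=
  let len_y := array.length
  let len_x := (array.headD "").toList.length
  let newcols := (List.range len_x).map (fun x => pvNewColB array up x)
  (List.range len_y).map (fun y => String.mk (newcols.map (fun c => c.getD y ' ')))

-- ===== PRECONDITION & SPEC =====
-- Pre_ = exactly the inputs where Python A returns: a nonempty grid, each row at least as long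
-- as row 0 (else IndexError), and only 'O'/'.'/'#' in the first len(array[0]) columns (else KeyError).
def Pre_move_stone_y_axis (array : List String) (up : Bool) : Prop :=
  array ≠ [] ∧ ∀ row ∈ array,
    (array.headD "").toList.length ≤ row.toList.length ∧
    ((row.toList.take (array.headD "").toList.length).all
      (fun c => c == 'O' || c == '.' || c == '#')) = true
instance (array : List String) (up : Bool) : Decidable (Pre_move_stone_y_axis array up) := by
  unfold Pre_move_stone_y_axis; infer_instance

def pvWitness_move_stone_y_axis : List String × Bool := (["O#.", ".O.", "..O"], true)

def Spec_move_stone_y_axis (array : List String) (up : Bool) (out : List String) : Prop := out = move_stone_y_axis_alt array up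
instance (array : List String) (up : Bool) (out : List String) : Decidable (Spec_move_stone_y_axis array up out) := by unfold Spec_move_stone_y_axis; infer_instance

-- ===== CLAIM (what is proved, stated in full; the proofs are below) =====
def Claim_equal_move_stone_y_axis : Prop := ∀ (array : List String) (up : Bool), Dom_move_stone_y_axis array up → Pre_move_stone_y_axis array up → Spec_move_stone_y_axis array up (move_stone_y_axis array up)

-- ===== LEMMAS AND PROOFS =====

-- A's column loop, reformulated as structural recursion on the column characters
def pvProcA : List Char → Nat → Nat → List (Nat × Nat × Nat)
  | [], o, d => if o ≠ 0 ∨ d ≠ 0 then [(o, d, 0)] else []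
  | c :: cs, o, d =>
    if c = '#' then (o, d, 1) :: pvProcA cs 0 0
    else if c = 'O' then pvProcA cs (o + 1) d else pvProcA cs o (d + 1)

def pvRenderPair (up : Bool) (o d : Nat) : List Char :=
  if up then List.replicate o 'O' ++ List.replicate d '.'
  else List.replicate d '.' ++ List.replicate o 'O'

def pvRenderAll (up : Bool) (steps : List (Nat × Nat × Nat)) : List Char :=
  (steps.map (pvRender up)).flatten

-- the rank table as a function (equal to the dict lookup on 'O'/'.'/'#'; other chars rank as '.')
def pvRk (up : Bool) (c : Char) : Int :=
  if c = '#' then 2 else if c = 'O' then (if up then 0 else 1) else (if up then 1 else 0)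

-- B's code list, as structural recursion on the column with the running '#' count
def pvCodesRec (up : Bool) : List Char → Nat → List Int
  | [], _ => []
  | c :: cs, k => (3 * (k : Int) + pvRk up c) :: pvCodesRec up cs (if c = '#' then k + 1 else k)

-- the codes of one rolled segment (ascending)
def pvSeg (up : Bool) (k o d : Nat) : List Int :=
  if up then List.replicate o (3 * (k : Int)) ++ List.replicate d (3 * (k : Int) + 1)
  else List.replicate d (3 * (k : Int)) ++ List.replicate o (3 * (k : Int) + 1)

-- the sorted code list, built segment by segment
def pvTgt (up : Bool) : List Char → Nat → Nat → Nat → List Int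
  | [], k, o, d => pvSeg up k o d
  | c :: cs, k, o, d =>
    if c = '#' then pvSeg up k o d ++ (3 * (k : Int) + 2) :: pvTgt up cs (k + 1) 0 0
    else if c = 'O' then pvTgt up cs k (o + 1) d else pvTgt up cs k o (d + 1)

def pvDec (up : Bool) (code : Int) : Char :=
  PySem.Dict.getD (pvInvD up) (PySem.Int.mod code 3) ' '

lemma pvFinalize_fold (cs : List Char) (segs : List (Nat × Nat × Nat)) (o d : Nat) :
    pvFinalize (cs.foldl pvStepF (segs, (o, d, 0))) = segs ++ pvProcA cs o d := by
  induction cs generalizing segs o d with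
  | nil => simp [pvFinalize, pvProcA]; split_ifs <;> simp_all
  | cons c cs ih =>
    by_cases hc : c = '#'
    · subst hc; simp [List.foldl_cons, pvStepF, pvProcA, ih]
    · by_cases ho : c = 'O'
      · subst ho; simp [List.foldl_cons, pvStepF, pvProcA, hc, ih]
      · simp [List.foldl_cons, pvStepF, pvProcA, hc, ho, ih]

lemma pvWriteFoldAux (up : Bool) :
    ∀ (steps : List (Nat × Nat × Nat)) (w0 : List Char),
      steps.foldl (fun w s => w ++ pvRender up s) w0 = w0 ++ (steps.map (pvRender up)).flatten := by
  intro steps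
  induction steps with
  | nil => simp
  | cons s steps ih =>
    intro w0
    simp only [List.foldl_cons, ih, List.map_cons, List.flatten_cons, List.append_assoc]

lemma pvWriteFor_eq (up : Bool) (steps : List (Nat × Nat × Nat)) :
    pvWriteFor up steps = pvRenderAll up steps := by
  simp [pvWriteFor, pvWriteFoldAux, pvRenderAll]

lemma pvRender_eq (up : Bool) (o d h : Nat) :
    pvRender up (o, d, h) = pvRenderPair up o d ++ List.replicate h '#' := by
  cases up <;> simp [pvRender, pvRenderPair, List.append_assoc]

-- the dict lookup agrees with pvRk on the admitted characters
lemma pvRankD_getD (up : Bool) (c : Char) (h : c = 'O' ∨ c = '.' ∨ c = '#') :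
    PySem.Dict.getD (pvRankD up) c 0 = pvRk up c := by
  rcases h with rfl | rfl | rfl <;> cases up <;> decide

lemma pvMod3 (k : Nat) (r : Int) :
    PySem.Int.mod (3 * (k : Int) + r) 3 = PySem.Int.mod r 3 := by
  simp [PySem.Int.mod]

lemma pvDec_code (up : Bool) (k : Nat) (c : Char) :
    pvDec up (3 * (k : Int) + pvRk up c) =
      (if c = '#' then '#' else if c = 'O' then 'O' else '.') := by
  unfold pvDec
  rw [pvMod3]
  by_cases h2 : c = '#'
  · subst h2; cases up <;> decide
  · by_cases hO : c = 'O'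
    · subst hO; cases up <;> decide
    · simp only [pvRk, if_neg h2, if_neg hO]
      cases up <;> decide

-- the codes fold is pvCodesRec (the dict lookup needs the admitted characters)
lemma pvCodesFold (up : Bool) (cs : List Char)
    (hcs : ∀ c ∈ cs, c = 'O' ∨ c = '.' ∨ c = '#') (acc : List Int) (k : Nat) :
    (cs.foldl (fun st c =>
        (st.1 ++ [3 * st.2 + PySem.Dict.getD (pvRankD up) c 0],
         if c = '#' then st.2 + 1 else st.2)) (acc, (k : Int))).1
      = acc ++ pvCodesRec up cs k := by
  induction cs generalizing acc k with
  | nil => simp [pvCodesRec]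
  | cons c cs ih =>
    have hc := hcs c (by simp)
    have hcs' : ∀ c' ∈ cs, c' = 'O' ∨ c' = '.' ∨ c' = '#' := fun c' h => hcs c' (by simp [h])
    simp only [List.foldl_cons, pvCodesRec]
    rw [pvRankD_getD up c hc]
    by_cases h2 : c = '#'
    · subst h2
      have : ((k : Int) + 1) = ((k + 1 : Nat) : Int) := by push_cast; ring
      simp only [reduceIte, this, ih hcs' _ (k + 1)]
      simp
    · simp only [if_neg h2, ih hcs' _ k]
      simp [h2]

lemma pvSeg_zero (up : Bool) (k : Nat) : pvSeg up k 0 0 = [] := by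
  cases up <;> simp [pvSeg]

lemma pvSeg_perm_cons (up : Bool) (c : Char) (hc : c ≠ '#') (k o d : Nat) :
    (if c = 'O' then pvSeg up k (o + 1) d else pvSeg up k o (d + 1)).Perm
      ((3 * (k : Int) + pvRk up c) :: pvSeg up k o d) := by
  by_cases hO : c = 'O'
  · subst hO
    cases up with
    | true => simp [pvSeg, pvRk, List.replicate_succ]
    | false =>
      simp only [pvSeg, pvRk, reduceIte, List.replicate_succ, if_neg hc]
      exact List.perm_middle
  · cases up with
    | true =>
      simp only [pvSeg, pvRk, if_neg hO, if_neg hc, reduceIte, List.replicate_succ]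
      exact List.perm_middle
    | false => simp [pvSeg, pvRk, hO, hc, List.replicate_succ]

lemma pvTgt_perm (up : Bool) (cs : List Char) (k o d : Nat) :
    (pvTgt up cs k o d).Perm (pvSeg up k o d ++ pvCodesRec up cs k) := by
  induction cs generalizing k o d with
  | nil => simp [pvTgt, pvCodesRec]
  | cons c cs ih =>
    by_cases h2 : c = '#'
    · subst h2
      simp only [pvTgt, pvCodesRec, reduceIte]
      have htail : (pvTgt up cs (k + 1) 0 0).Perm (pvCodesRec up cs (k + 1)) := by
        have := ih (k + 1) 0 0
        rwa [pvSeg_zero, List.nil_append] at this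
      have : pvRk up '#' = 2 := by cases up <;> decide
      rw [this]
      exact List.Perm.append_left _ (List.Perm.cons _ htail)
    · simp only [pvTgt, pvCodesRec, if_neg h2]
      have h1 : (if c = 'O' then pvTgt up cs k (o + 1) d else pvTgt up cs k o (d + 1)).Perm
          ((if c = 'O' then pvSeg up k (o + 1) d else pvSeg up k o (d + 1)) ++ pvCodesRec up cs k) := by
        by_cases hO : c = 'O'
        · rw [if_pos hO, if_pos hO]; exact ih k _ _
        · rw [if_neg hO, if_neg hO]; exact ih k _ _
      refine h1.trans ?_
      refine (List.Perm.append_right _ (pvSeg_perm_cons up c h2 k o d)).trans ?_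
      simpa using List.perm_middle.symm

lemma pvSeg_mem (up : Bool) (k o d : Nat) (v : Int) (hv : v ∈ pvSeg up k o d) :
    3 * (k : Int) ≤ v ∧ v ≤ 3 * (k : Int) + 1 := by
  cases up <;> simp [pvSeg, List.mem_replicate] at hv <;>
    rcases hv with ⟨-, rfl⟩ | ⟨-, rfl⟩ <;> omega

lemma pvTgt_lb (up : Bool) (cs : List Char) (k o d : Nat) (v : Int)
    (hv : v ∈ pvTgt up cs k o d) : 3 * (k : Int) ≤ v := by
  induction cs generalizing k o d with
  | nil => exact (pvSeg_mem up k o d v hv).1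
  | cons c cs ih =>
    by_cases h2 : c = '#'
    · subst h2
      simp only [pvTgt, reduceIte, List.mem_append, List.mem_cons] at hv
      rcases hv with h | rfl | h
      · exact (pvSeg_mem up k o d v h).1
      · omega
      · have := ih (k + 1) 0 0 h
        push_cast at this ⊢
        omega
    · simp only [pvTgt, if_neg h2] at hv
      by_cases hO : c = 'O'
      · rw [if_pos hO] at hv; exact ih k (o + 1) d hv
      · rw [if_neg hO] at hv; exact ih k o (d + 1) hv

lemma pvSeg_pairwise (up : Bool) (k o d : Nat) :
    (pvSeg up k o d).Pairwise (· ≤ ·) := by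
  cases up <;>
  · simp only [pvSeg, reduceIte, Bool.false_eq_true]
    refine List.pairwise_append.mpr ⟨List.pairwise_replicate.mpr (by omega),
      List.pairwise_replicate.mpr (by omega), ?_⟩
    intro a ha b hb
    simp [List.mem_replicate] at ha hb
    omega

lemma pvTgt_pairwise (up : Bool) (cs : List Char) (k o d : Nat) :
    (pvTgt up cs k o d).Pairwise (· ≤ ·) := by
  induction cs generalizing k o d with
  | nil => exact pvSeg_pairwise up k o d
  | cons c cs ih =>
    by_cases h2 : c = '#'
    · subst h2
      simp only [pvTgt, reduceIte]
      refine List.pairwise_append.mpr ⟨pvSeg_pairwise up k o d, ?_, ?_⟩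
      · refine List.pairwise_cons.mpr ⟨?_, ih (k + 1) 0 0⟩
        intro v hv
        have := pvTgt_lb up cs (k + 1) 0 0 v hv
        push_cast at this ⊢
        omega
      · intro a ha b hb
        have h1 := (pvSeg_mem up k o d a ha).2
        simp only [List.mem_cons] at hb
        rcases hb with rfl | hb
        · omega
        · have := pvTgt_lb up cs (k + 1) 0 0 b hb
          push_cast at this ⊢
          omega
    · simp only [pvTgt, if_neg h2]
      by_cases hO : c = 'O'
      · rw [if_pos hO]; exact ih k (o + 1) d
      · rw [if_neg hO]; exact ih k o (d + 1)

lemma pvSeg_decode (up : Bool) (k o d : Nat) :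
    (pvSeg up k o d).map (pvDec up) = pvRenderPair up o d := by
  have hO : pvDec up (3 * (k : Int) + pvRk up 'O') = 'O' := by rw [pvDec_code]; rfl
  have hD : pvDec up (3 * (k : Int) + pvRk up '.') = '.' := by rw [pvDec_code]; rfl
  cases up with
  | true =>
    have h0 : pvDec true (3 * (k : Int)) = 'O' := by simpa [pvRk] using hO
    have h1 : pvDec true (3 * (k : Int) + 1) = '.' := by simpa [pvRk] using hD
    simp [pvSeg, pvRenderPair, List.map_replicate, h0, h1]
  | false =>
    have h0 : pvDec false (3 * (k : Int)) = '.' := by simpa [pvRk] using hD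
    have h1 : pvDec false (3 * (k : Int) + 1) = 'O' := by simpa [pvRk] using hO
    simp [pvSeg, pvRenderPair, List.map_replicate, h0, h1]

lemma pvTgt_decode (up : Bool) (cs : List Char) (k o d : Nat) :
    (pvTgt up cs k o d).map (pvDec up) = pvRenderAll up (pvProcA cs o d) := by
  induction cs generalizing k o d with
  | nil =>
    simp only [pvTgt, pvProcA]
    rw [pvSeg_decode]
    split_ifs with h0
    · simp [pvRenderAll, pvRender_eq]
    · push_neg at h0
      simp [h0.1, h0.2, pvRenderAll, pvRenderPair]
  | cons c cs ih =>
    by_cases h2 : c = '#'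
    · subst h2
      simp only [pvTgt, pvProcA, reduceIte, List.map_append, List.map_cons]
      have hh : pvDec up (3 * (k : Int) + 2) = '#' := by
        have : pvRk up '#' = 2 := by cases up <;> decide
        rw [← this, pvDec_code]; rfl
      rw [pvSeg_decode, hh, ih (k + 1) 0 0]
      simp [pvRenderAll, pvRender_eq, pvRenderPair, List.replicate_succ]
    · simp only [pvTgt, pvProcA, if_neg h2]
      by_cases hO : c = 'O'
      · rw [if_pos hO, if_pos hO, ih k (o + 1) d]
      · rw [if_neg hO, if_neg hO, ih k o (d + 1)]

-- per-column equality: A's write string = B's decoded sorted codes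
lemma pvCol_eq (array : List String) (up : Bool) (x : Nat)
    (hcol : ∀ c ∈ array.map (fun row => row.toList.getD x '.'), c = 'O' ∨ c = '.' ∨ c = '#') :
    pvWriteFor up (pvStepsFor array x) = pvNewColB array up x := by
  have hcodes : pvCodesB array up x
      = pvCodesRec up (array.map (fun row => row.toList.getD x '.')) 0 := by
    unfold pvCodesB
    rw [← List.foldl_map (f := fun row : String => row.toList.getD x '.')
      (g := fun st c =>
        (st.1 ++ [3 * st.2 + PySem.Dict.getD (pvRankD up) c 0],
         if c = '#' then st.2 + 1 else st.2))]
    have h := pvCodesFold up _ hcol [] 0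
    simp only [Nat.cast_zero, List.nil_append] at h
    exact h
  have hsorted : PySem.List.sorted (pvCodesB array up x) (fun v => v) false
      = pvTgt up (array.map (fun row => row.toList.getD x '.')) 0 0 0 := by
    apply PySem.List.sorted_id_eq_of_perm_of_pairwise
    · rw [hcodes]
      have := pvTgt_perm up (array.map (fun row => row.toList.getD x '.')) 0 0 0
      rwa [pvSeg_zero, List.nil_append] at this
    · exact pvTgt_pairwise up _ 0 0 0
  unfold pvNewColB
  rw [hsorted]
  rw [show (fun code => PySem.Dict.getD (pvInvD up) (PySem.Int.mod code 3) ' ') = pvDec up from rfl]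
  rw [pvTgt_decode, pvWriteFor_eq, pvStepsFor,
    ← List.foldl_map (f := fun row : String => row.toList.getD x '.') (g := pvStepF),
    pvFinalize_fold, List.nil_append]

lemma pvRenderAll_length (up : Bool) (cs : List Char) (o d : Nat) :
    (pvRenderAll up (pvProcA cs o d)).length = o + d + cs.length := by
  induction cs generalizing o d with
  | nil =>
    simp only [pvProcA]
    split_ifs with h0
    · cases up <;> simp [pvRenderAll, pvRender] <;> omega
    · push_neg at h0; simp [h0.1, h0.2, pvRenderAll]
  | cons c cs ih =>
    by_cases hc : c = '#'
    · subst hc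
      have h := ih 0 0
      simp only [pvRenderAll] at h ⊢
      simp only [pvProcA, reduceIte, List.map_cons, List.flatten_cons, List.length_append, h]
      cases up <;> simp [pvRender] <;> omega
    · by_cases ho : c = 'O'
      · subst ho; simp only [pvProcA, if_neg hc, reduceIte]; rw [ih]; simp; omega
      · simp only [pvProcA, if_neg hc, if_neg ho]; rw [ih]; simp; omega

lemma pvWriteFor_length (array : List String) (up : Bool) (x : Nat) :
    (pvWriteFor up (pvStepsFor array x)).length = array.length := by
  rw [pvWriteFor_eq, pvStepsFor,
    ← List.foldl_map (f := fun row : String => row.toList.getD x '.') (g := pvStepF),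
    pvFinalize_fold, List.nil_append, pvRenderAll_length]
  simp

lemma pvTranspose (ws : List (List Char)) (init : List (List Char)) (n : Nat)
    (hinit : init.length = n) (hws : ∀ w ∈ ws, w.length = n) :
    ws.foldl (fun na w => List.zipWith (fun s c => s ++ [c]) na w) init
      = (List.range n).map (fun y => init.getD y [] ++ ws.map (fun w => w.getD y ' ')) := by
  induction ws generalizing init with
  | nil =>
    subst hinit
    apply List.ext_getElem
    · simp
    · intro y h1 h2
      simp only [List.foldl_nil, List.getElem_map, List.getElem_range, List.map_nil,
        List.append_nil]
      exact (List.getD_eq_getElem _ _ (by simpa using h1)).symm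
  | cons w ws ih =>
    have hw : w.length = n := hws w (by simp)
    have hlen : (List.zipWith (fun s c => s ++ [c]) init w).length = n := by simp [hinit, hw]
    rw [List.foldl_cons, ih _ hlen (fun w hw => hws w (by simp [hw]))]
    apply List.map_congr_left
    intro y hy
    rw [List.mem_range] at hy
    have h1 : (List.zipWith (fun s c => s ++ [c]) init w).getD y []
        = init.getD y [] ++ [w.getD y ' '] := by
      rw [List.getD_eq_getElem _ _ (by omega : y < (List.zipWith (fun s c => s ++ [c]) init w).length)]
      rw [List.getElem_zipWith]
      rw [List.getD_eq_getElem _ _ (by omega), List.getD_eq_getElem _ _ (by omega)]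
    rw [h1]
    simp [List.append_assoc]

-- under Pre_, every character of column x (x < len(array[0])) is 'O', '.' or '#'
lemma pvPre_col (array : List String) (up : Bool) (x : Nat)
    (hpre : Pre_move_stone_y_axis array up) (hx : x < (array.headD "").toList.length) :
    ∀ c ∈ array.map (fun row => row.toList.getD x '.'), c = 'O' ∨ c = '.' ∨ c = '#' := by
  intro c hc
  simp only [List.mem_map] at hc
  obtain ⟨row, hrow, rfl⟩ := hc
  obtain ⟨hlen, hall⟩ := hpre.2 row hrow
  have hxlen : x < row.toList.length := lt_of_lt_of_le hx hlen
  rw [List.getD_eq_getElem _ _ hxlen]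
  have hmem : row.toList[x] ∈ row.toList.take (array.headD "").toList.length := by
    have hx' : x < (row.toList.take (array.headD "").toList.length).length := by
      simp only [List.length_take, lt_min_iff]
      exact ⟨hx, hxlen⟩
    rw [← List.getElem_take]
    exact List.getElem_mem hx'
  have h := List.all_eq_true.mp hall _ hmem
  simp only [Bool.or_eq_true, beq_iff_eq] at h
  tauto

lemma pvPorts_eq (array : List String) (up : Bool)
    (hpre : Pre_move_stone_y_axis array up) :
    move_stone_y_axis array up = move_stone_y_axis_alt array up := by
  simp only [move_stone_y_axis, move_stone_y_axis_alt]
  have hmap :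
      (List.range (array.headD "").toList.length).map
        (fun x => pvWriteFor up (((List.range (array.headD "").toList.length).map
          (fun x => pvStepsFor array x)).getD x []))
      = (List.range (array.headD "").toList.length).map (fun x => pvNewColB array up x) := by
    apply List.map_congr_left
    intro x hx
    rw [List.mem_range] at hx
    rw [List.getD_eq_getElem _ _ (by simpa using hx)]
    simp only [List.getElem_map, List.getElem_range]
    exact pvCol_eq array up x (pvPre_col array up x hpre hx)
  have hfold :
      (List.range (array.headD "").toList.length).foldl
        (fun na x => List.zipWith (fun s c => s ++ [c]) na
          (pvWriteFor up (((List.range (array.headD "").toList.length).map (fun x => pvStepsFor array x)).getD x [])))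
        (List.replicate array.length [])
      = ((List.range (array.headD "").toList.length).map (fun x => pvNewColB array up x)).foldl
          (fun na w => List.zipWith (fun s c => s ++ [c]) na w) (List.replicate array.length []) := by
    rw [← List.foldl_map
      (f := fun x => pvWriteFor up (((List.range (array.headD "").toList.length).map
        (fun x => pvStepsFor array x)).getD x []))
      (g := fun na w => List.zipWith (fun s c => s ++ [c]) na w), hmap]
  have hlen : ∀ w ∈ (List.range (array.headD "").toList.length).map
      (fun x => pvNewColB array up x), w.length = array.length := by
    intro w hw
    simp only [List.mem_map, List.mem_range] at hw
    obtain ⟨x, hx, rfl⟩ := hw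
    rw [← pvCol_eq array up x (pvPre_col array up x hpre hx)]
    exact pvWriteFor_length array up x
  rw [hfold, pvTranspose _ _ array.length (by simp) hlen]
  simp [List.map_map, Function.comp]

-- ===== VERDICT (by name: the statement is the Claim_ definition above) =====
theorem move_stone_y_axis_spec : Claim_equal_move_stone_y_axis := by
  intro array up _ hpre
  exact pvPorts_eq array up hpre
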